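-- pv_equiv track=rewrite | github.com/amitjoshi2724/gpi-job-scheduling | experiment1.py | find_pred
-- ===== SOURCE A (Python) =====
-- def find_pred(jobs, start_i):
--     lo, hi = 0, len(jobs)
--     while lo < hi:
--         mid = (lo + hi) // 2
--         if jobs[mid][1] <= start_i:
--             lo = mid + 1
--         else:
--             hi = mid
--     return lo - 1  # correctly gives index of latest non-overlapping job
-- ===== SOURCE B (Python) =====
-- def find_pred(jobs, start_i):
--     # recurse on sublists: split at the middle and descend into a half-slice,
--     # carrying the absolute base index of the current sublist
--     def go(sub, base):
--         if not sub:
--             return base - 1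
--         h = len(sub) // 2
--         if sub[h][1] <= start_i:
--             return go(sub[h + 1:], base + h + 1)
--         return go(sub[:h], base)
--     return go(jobs, 0)
-- ===== Notes on version B (the rewrite author's own statement) =====
-- stated objective: alternative
-- what changed: Replaces the iterative (lo,hi) index loop by a structural recursion on list slices: each step probes the middle element of the current sublist and recurses into the right or left half-slice while carrying the absolute base index; same probe sequence and boundary semantics, different data traversal (slices instead of index arithmetic).
import Mathlib
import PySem

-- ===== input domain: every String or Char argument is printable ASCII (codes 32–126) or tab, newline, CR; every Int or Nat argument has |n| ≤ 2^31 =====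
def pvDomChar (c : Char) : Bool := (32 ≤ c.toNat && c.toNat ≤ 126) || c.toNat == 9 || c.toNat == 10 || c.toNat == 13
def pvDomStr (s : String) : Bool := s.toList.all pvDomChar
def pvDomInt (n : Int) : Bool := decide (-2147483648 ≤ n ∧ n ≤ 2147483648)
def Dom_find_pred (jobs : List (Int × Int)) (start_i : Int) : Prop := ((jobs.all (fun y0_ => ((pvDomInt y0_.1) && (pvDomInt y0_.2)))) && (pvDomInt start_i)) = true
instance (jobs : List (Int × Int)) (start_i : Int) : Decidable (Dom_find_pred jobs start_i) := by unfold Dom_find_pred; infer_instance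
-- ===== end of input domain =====

-- B replaces A's iterative (lo,hi) index loop by a structural recursion on list slices with a carried base index; same probes, different decomposition.
-- ===== PORT A =====
-- A's 'while lo < hi' loop, as a recursion over the state (lo, hi); returns the final lo
def findPredLoop (jobs : List (Int × Int)) (start_i lo hi : Int) : Int :=
  if _h : lo < hi then
    let mid := PySem.Int.floordiv (lo + hi) 2
    match PySem.List.pyGet? jobs mid with
    | some p =>
        if p.2 ≤ start_i then findPredLoop jobs start_i (mid + 1) hi
        else findPredLoop jobs start_i lo mid
    | none => lo  -- IndexError in Python; not reached from find_pred (there 0 ≤ lo ≤ mid < hi ≤ len)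
  else lo
termination_by (hi - lo).toNat
decreasing_by
  all_goals
    have h2 : PySem.Int.floordiv (lo + hi) 2 = (lo + hi) / 2 :=
      PySem.Int.floordiv_eq_ediv_of_pos (by omega)
    omega

def find_pred (jobs : List (Int × Int)) (start_i : Int) : Int :=
  findPredLoop jobs start_i 0 jobs.length - 1

-- ===== PORT B =====
-- B's helper go(sub, base): probe the middle of the sublist, recurse into a half-slice
def findPredGo (start_i : Int) (sub : List (Int × Int)) (base : Int) : Int :=
  if hne : sub.length = 0 then base - 1
  else
    have hlt : sub.length / 2 < sub.length :=
      Nat.div_lt_self (Nat.pos_of_ne_zero hne) one_lt_two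
    if (sub[sub.length / 2]'hlt).2 ≤ start_i then
      findPredGo start_i (sub.drop (sub.length / 2 + 1)) (base + (sub.length / 2 : Nat) + 1)
    else
      findPredGo start_i (sub.take (sub.length / 2)) base
termination_by sub.length
decreasing_by
  all_goals simp [List.length_drop, List.length_take]; omega

def find_pred_alt (jobs : List (Int × Int)) (start_i : Int) : Int :=
  findPredGo start_i jobs 0

-- ===== PRECONDITION & SPEC =====
def Spec_find_pred (jobs : List (Int × Int)) (start_i : Int) (out : Int) : Prop := out = find_pred_alt jobs start_i
instance (jobs : List (Int × Int)) (start_i : Int) (out : Int) : Decidable (Spec_find_pred jobs start_i out) := by unfold Spec_find_pred; infer_instance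

-- ===== CLAIM (what is proved, stated in full; the proofs are below) =====
def Claim_equal_find_pred : Prop := ∀ (jobs : List (Int × Int)) (start_i : Int), Dom_find_pred jobs start_i → Spec_find_pred jobs start_i (find_pred jobs start_i)

-- ===== LEMMAS AND PROOFS =====
-- A's loop on (lo, hi) equals B's recursion on the sublist jobs[lo:hi] with base lo
lemma loop_eq_go (jobs : List (Int × Int)) (start_i : Int) :
    ∀ (k lo hi : Nat), hi ≤ jobs.length → hi - lo ≤ k →
      findPredLoop jobs start_i lo hi - 1
        = findPredGo start_i ((jobs.drop lo).take (hi - lo)) lo := by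
  intro k
  induction k with
  | zero =>
      intro lo hi hhi hk
      rw [findPredLoop, findPredGo]
      have h1 : ¬ ((lo : Int) < hi) := by omega
      simp [h1, show hi - lo = 0 by omega]
  | succ k ih =>
      intro lo hi hhi hk
      rw [findPredLoop, findPredGo]
      by_cases hlt : lo < hi
      · have hlt' : (lo : Int) < hi := by exact_mod_cast hlt
        have hediv : PySem.Int.floordiv ((lo : Int) + hi) 2 = ((lo + hi : Nat) / 2 : Nat) := by
          rw [PySem.Int.floordiv_eq_ediv_of_pos (by omega)]
          push_cast [Int.natCast_div]
          norm_num
        set m : Nat := (lo + hi) / 2 with hm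
        have hmlt : m < jobs.length := by omega
        have hget : PySem.List.pyGet? jobs ((m : Nat) : Int) = some jobs[m] := by
          apply PySem.List.pyGet?_eq_some_getElem <;> omega
        have hsublen : ((jobs.drop lo).take (hi - lo)).length = hi - lo := by
          simp [List.length_take, List.length_drop]; omega
        have hhalf : (hi - lo) / 2 = m - lo := by omega
        have hne : ¬ ((jobs.drop lo).take (hi - lo)).length = 0 := by omega
        have hidx : ((jobs.drop lo).take (hi - lo))[((jobs.drop lo).take (hi - lo)).length / 2]'
            (Nat.div_lt_self (Nat.pos_of_ne_zero hne) one_lt_two) = jobs[m] := by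
          have h2 : ((jobs.drop lo).take (hi - lo)).length / 2 = m - lo := by
            rw [hsublen]; omega
          simp only [List.getElem_take, List.getElem_drop, h2]
          congr 1; omega
        simp only [hlt', dif_pos, hediv, hget, hne, dif_neg, not_false_iff, hidx]
        by_cases hc : (jobs[m]).2 ≤ start_i
        · rw [if_pos hc, if_pos hc]
          have hdrop : ((jobs.drop lo).take (hi - lo)).drop
              (((jobs.drop lo).take (hi - lo)).length / 2 + 1)
              = (jobs.drop (m + 1)).take (hi - (m + 1)) := by
            rw [hsublen, hhalf, List.drop_take, List.drop_drop]
            congr 1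
            · omega
            · congr 1
              omega
          rw [hdrop]
          have hbase : ((lo : Int) + ((List.take (hi - lo) (List.drop lo jobs)).length / 2 : Nat) + 1 : Int) = ((m + 1 : Nat) : Int) := by
            rw [hsublen, hhalf]; omega
          rw [hbase]
          have := ih (m + 1) hi hhi (by omega)
          push_cast at this ⊢
          exact this
        · rw [if_neg hc, if_neg hc]
          have htake : ((jobs.drop lo).take (hi - lo)).take
              (((jobs.drop lo).take (hi - lo)).length / 2)
              = (jobs.drop lo).take (m - lo) := by
            rw [hsublen, hhalf, List.take_take]
            congr 1; omega
          rw [htake]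
          exact ih lo m (by omega) (by omega)
      · have h1 : ¬ ((lo : Int) < hi) := by omega
        simp [h1, show hi - lo = 0 by omega]

-- ===== VERDICT (by name: the statement is the Claim_ definition above) =====
theorem find_pred_spec : Claim_equal_find_pred := by
  intro jobs start_i _
  unfold Spec_find_pred find_pred find_pred_alt
  have := loop_eq_go jobs start_i jobs.length 0 jobs.length (by omega) (by omega)
  simpa using this
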